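-- pv_equiv track=rewrite | github.com/Yan-Zhelanov/algorithms | sprint_2/1_issues/l_fibonacсi_modulo.py | get_fibonacci_last_numbers
-- ===== SOURCE A (Python) =====
-- def get_fibonacci_last_numbers(number, count_last):
--     first = 0
--     second = 1
--     result = 1
--     index = 0
--     module = 10 ** count_last
--     while index < number:
--         result = (first + second) % module
--         first = second
--         second = result
--         index += 1
--     return result
-- ===== SOURCE B (Python) =====
-- def get_fibonacci_last_numbers(number, count_last):
--     if number <= 0:
--         return 1
--     module = 10 ** count_last
--
--     def fib_pair(n):
--         # (F(n) % module, F(n + 1) % module) by fast doubling.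
--         if n == 0:
--             return (0 % module, 1 % module)
--         a, b = fib_pair(n >> 1)
--         c = a * ((2 * b - a) % module) % module
--         d = (a * a + b * b) % module
--         if n & 1:
--             return (d, (c + d) % module)
--         return (c, d)
--
--     return fib_pair(number + 1)[0]
-- ===== Notes on version B (the rewrite author's own statement) =====
-- stated objective: faster
-- what changed: Replaced the O(number) iterative Fibonacci loop with recursive fast-doubling mod 10**count_last (intended as faster; measured 44.5x at the largest size where both finished); Pre_ excludes count_last < 0 with number > 0, where 10**count_last is a float and A returns a float instead of an int.
-- outside the precondition, e.g. on get_fibonacci_last_numbers(1, -1): A returns 0.09999999999999995, B returns 9.99999999999998e-05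
import Mathlib
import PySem

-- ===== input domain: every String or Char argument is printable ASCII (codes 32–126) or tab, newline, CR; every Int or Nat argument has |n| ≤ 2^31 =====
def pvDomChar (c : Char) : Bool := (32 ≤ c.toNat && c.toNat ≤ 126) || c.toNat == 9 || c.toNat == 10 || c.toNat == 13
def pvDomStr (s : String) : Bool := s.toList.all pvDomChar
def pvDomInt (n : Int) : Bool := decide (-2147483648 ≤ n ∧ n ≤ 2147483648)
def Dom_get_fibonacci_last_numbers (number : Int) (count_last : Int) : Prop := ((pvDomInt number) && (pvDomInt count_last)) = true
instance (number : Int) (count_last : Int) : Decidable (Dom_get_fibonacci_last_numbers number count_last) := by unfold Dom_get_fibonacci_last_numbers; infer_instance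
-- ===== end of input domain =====

-- B replaces A's linear loop by fast-doubling Fibonacci mod 10^count_last (intended as faster; measured 44.5x at the largest timed size both finished).

-- ===== PORT A =====
-- the while loop of A, state (first, second, result, index)
-- fuel = (number - index).toNat, so the 'index < number' test drives the loop exactly as in A
def pvFibLoopA (fuel : Nat) (number module : Int) (first second result index : Int) : Int :=
  match fuel with
  | 0 => result
  | f + 1 =>
    if index < number then
      let r := PySem.Int.mod (first + second) module
      pvFibLoopA f number module second r r (index + 1)
    else result

def get_fibonacci_last_numbers (number : Int) (count_last : Int) : Int :=
  -- 'module = 10 ** count_last': for count_last < 0 Python yields a float (excluded by Pre_);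
  -- ported as 10 ^ count_last.toNat, exact for count_last ≥ 0
  pvFibLoopA number.toNat number (10 ^ count_last.toNat) 0 1 1 0

-- ===== PORT B =====
-- Source B's fib_pair: (F n % m, F (n+1) % m) by fast doubling
def pvFibPairB (m : Int) (n : Nat) : Int × Int :=
  if n = 0 then (PySem.Int.mod 0 m, PySem.Int.mod 1 m)
  else
    let p := pvFibPairB m (n / 2)
    let a := p.1
    let b := p.2
    let c := PySem.Int.mod (a * PySem.Int.mod (2 * b - a) m) m
    let d := PySem.Int.mod (a * a + b * b) m
    if n % 2 = 1 then (d, PySem.Int.mod (c + d) m) else (c, d)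
termination_by n
decreasing_by omega

def get_fibonacci_last_numbers_alt (number : Int) (count_last : Int) : Int :=
  if number ≤ 0 then 1
  else (pvFibPairB (10 ^ count_last.toNat) (number.toNat + 1)).1

-- ===== PRECONDITION & SPEC =====
-- Pre_ excludes count_last < 0 with number > 0: there '10 ** count_last' is a Python float and A
-- returns a float, not a value of the declared Int type.
def Pre_get_fibonacci_last_numbers (number : Int) (count_last : Int) : Prop :=
  number ≤ 0 ∨ 0 ≤ count_last
instance (number : Int) (count_last : Int) : Decidable (Pre_get_fibonacci_last_numbers number count_last) := by unfold Pre_get_fibonacci_last_numbers; infer_instance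

def pvWitness_get_fibonacci_last_numbers : Int × Int := (10, 3)

def Spec_get_fibonacci_last_numbers (number : Int) (count_last : Int) (out : Int) : Prop := out = get_fibonacci_last_numbers_alt number count_last
instance (number : Int) (count_last : Int) (out : Int) : Decidable (Spec_get_fibonacci_last_numbers number count_last out) := by unfold Spec_get_fibonacci_last_numbers; infer_instance

-- ===== CLAIM (what is proved, stated in full; the proofs are below) =====
def Claim_equal_get_fibonacci_last_numbers : Prop := ∀ (number : Int) (count_last : Int), Dom_get_fibonacci_last_numbers number count_last → Pre_get_fibonacci_last_numbers number count_last → Spec_get_fibonacci_last_numbers number count_last (get_fibonacci_last_numbers number count_last)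

-- ===== LEMMAS AND PROOFS =====

theorem pv_add_mod_congr (m x y X Y : Int) (hx : x % m = X % m) (hy : y % m = Y % m) :
    (x + y) % m = (X + Y) % m := by
  rw [Int.add_emod, hx, hy, ← Int.add_emod]

theorem pvFibPairB_eq (m : Int) (hm : 0 < m) : ∀ n : Nat,
    pvFibPairB m n = ((Nat.fib n : Int) % m, (Nat.fib (n + 1) : Int) % m) := by
  intro n
  induction n using Nat.strong_induction_on with
  | _ n ih =>
    rw [pvFibPairB]
    by_cases h0 : n = 0
    · subst h0
      simp [PySem.Int.mod_eq_emod_of_pos hm]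
    · simp only [h0, ite_false]
      rw [ih (n / 2) (by omega)]
      set k := n / 2 with hk
      have hfk : ((Nat.fib k : Int) % m) ≡ (Nat.fib k : Int) [ZMOD m] :=
        Int.emod_emod_of_dvd _ dvd_rfl
      have hfk1 : ((Nat.fib (k + 1) : Int) % m) ≡ (Nat.fib (k + 1) : Int) [ZMOD m] :=
        Int.emod_emod_of_dvd _ dvd_rfl
      simp only [PySem.Int.mod_eq_emod_of_pos hm]
      -- c = fib (2k) % m
      have hfib2k : (Nat.fib (2 * k) : Int) = (Nat.fib k : Int) * (2 * (Nat.fib (k + 1) : Int) - (Nat.fib k : Int)) := by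
        have h := Nat.fib_two_mul k
        have hle : Nat.fib k ≤ 2 * Nat.fib (k + 1) := by
          have := Nat.fib_le_fib_succ (n := k); omega
        push_cast [h, Nat.cast_sub hle]; ring
      have hc : ((Nat.fib k : Int) % m * ((2 * ((Nat.fib (k + 1) : Int) % m) - (Nat.fib k : Int) % m) % m)) % m
          = (Nat.fib (2 * k) : Int) % m := by
        have h1 : (2 * ((Nat.fib (k + 1) : Int) % m) - (Nat.fib k : Int) % m)
            ≡ (2 * (Nat.fib (k + 1) : Int) - (Nat.fib k : Int)) [ZMOD m] :=
          ((Int.ModEq.refl 2).mul hfk1).sub hfk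
        have h2 := (Int.emod_emod_of_dvd (2 * ((Nat.fib (k + 1) : Int) % m) - (Nat.fib k : Int) % m)
          (dvd_refl m)).trans h1
        have h3 := hfk.mul h2
        calc ((Nat.fib k : Int) % m * ((2 * ((Nat.fib (k + 1) : Int) % m) - (Nat.fib k : Int) % m) % m)) % m
            = ((Nat.fib k : Int) * (2 * (Nat.fib (k + 1) : Int) - (Nat.fib k : Int))) % m := h3
          _ = (Nat.fib (2 * k) : Int) % m := by rw [hfib2k]
      -- d = fib (2k + 1) % m
      have hfib2k1 : (Nat.fib (2 * k + 1) : Int)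
          = (Nat.fib k : Int) * (Nat.fib k : Int) + (Nat.fib (k + 1) : Int) * (Nat.fib (k + 1) : Int) := by
        have h := Nat.fib_two_mul_add_one k
        push_cast [h]; ring
      have hd : ((Nat.fib k : Int) % m * ((Nat.fib k : Int) % m)
            + (Nat.fib (k + 1) : Int) % m * ((Nat.fib (k + 1) : Int) % m)) % m
          = (Nat.fib (2 * k + 1) : Int) % m := by
        have h3 := (hfk.mul hfk).add (hfk1.mul hfk1)
        calc ((Nat.fib k : Int) % m * ((Nat.fib k : Int) % m)
              + (Nat.fib (k + 1) : Int) % m * ((Nat.fib (k + 1) : Int) % m)) % m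
            = ((Nat.fib k : Int) * (Nat.fib k : Int)
              + (Nat.fib (k + 1) : Int) * (Nat.fib (k + 1) : Int)) % m := h3
          _ = (Nat.fib (2 * k + 1) : Int) % m := by rw [hfib2k1]
      by_cases hodd : n % 2 = 1
      · have hn : n = 2 * k + 1 := by omega
        simp only [hodd, ite_true]
        refine Prod.ext ?_ ?_
        · simpa [hn] using hd
        · show (_ + _) % m = (Nat.fib (n + 1) : Int) % m
          have hsum : (Nat.fib (n + 1) : Int) = (Nat.fib (2 * k) : Int) + (Nat.fib (2 * k + 1) : Int) := by
            have : n + 1 = 2 * k + 2 := by omega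
            rw [this, Nat.fib_add_two]; push_cast; ring
          rw [hsum]
          exact pv_add_mod_congr m _ _ _ _ (by rw [hc]; exact Int.emod_emod_of_dvd _ dvd_rfl)
            (by rw [hd]; exact Int.emod_emod_of_dvd _ dvd_rfl)
      · have hn : n = 2 * k := by omega
        simp only [hodd, ite_false]
        refine Prod.ext ?_ ?_
        · simpa [hn] using hc
        · simpa [hn] using hd

theorem pvFibLoopA_eq (number m : Int) (hm : 0 < m) : ∀ (fuel : Nat) (i first second result : Int),
    (number - i).toNat = fuel → 0 ≤ i → i < number →
    first % m = (Nat.fib i.toNat : Int) % m →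
    second % m = (Nat.fib (i.toNat + 1) : Int) % m →
    pvFibLoopA fuel number m first second result i = (Nat.fib (number.toNat + 1) : Int) % m := by
  intro fuel
  induction fuel with
  | zero => intro i _ _ _ hfu hi hin _ _; omega
  | succ fuel ih =>
    intro i first second result hfu hi hin h1 h2
    simp only [pvFibLoopA, hin, if_pos]
    have hmod := PySem.Int.mod_eq_emod_of_pos hm (a := first + second)
    have hr : PySem.Int.mod (first + second) m = ((Nat.fib i.toNat : Int) + (Nat.fib (i.toNat + 1) : Int)) % m := by
      rw [hmod]; exact pv_add_mod_congr m _ _ _ _ h1 h2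
    have hrfib : PySem.Int.mod (first + second) m = (Nat.fib (i.toNat + 2) : Int) % m := by
      rw [hr, Nat.fib_add_two]; push_cast; ring_nf
    by_cases hlt : i + 1 < number
    · apply ih (i + 1) second _ _ (by omega) (by omega) hlt
      · have : (i + 1).toNat = i.toNat + 1 := by omega
        rw [this]; exact h2
      · have h3 : (i + 1).toNat + 1 = i.toNat + 2 := by omega
        rw [h3, hrfib]
        exact Int.emod_emod_of_dvd _ dvd_rfl
    · have hf0 : fuel = 0 := by omega
      subst hf0
      simp only [pvFibLoopA]
      have : number.toNat + 1 = i.toNat + 2 := by omega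
      rw [this]
      exact hrfib

-- ===== VERDICT (by name: the statement is the Claim_ definition above) =====
theorem get_fibonacci_last_numbers_spec : Claim_equal_get_fibonacci_last_numbers := by
  intro number count_last _ _
  unfold Spec_get_fibonacci_last_numbers get_fibonacci_last_numbers get_fibonacci_last_numbers_alt
  by_cases hn : number ≤ 0
  · rcases h : number.toNat with _ | k
    · simp [pvFibLoopA, hn]
    · omega
  · have hn' : 0 < number := by omega
    have hm : (0 : Int) < 10 ^ count_last.toNat := by positivity
    rw [if_neg hn]
    rw [pvFibLoopA_eq number _ hm number.toNat 0 0 1 1 (by omega) (le_refl 0) (by omega)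
      (by simp) (by simp)]
    rw [pvFibPairB_eq _ hm]
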